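-- pv_equiv track=rewrite | github.com/mariusprd/timetable-optimisation-project | state.py | __compute_c_mult
-- ===== SOURCE A (Python) =====
-- def __compute_c_mult(timetable: dict) -> int:
--     '''
--         Computes the fitness for the c_mult constraint (professor in multiple places at the same time)
--     '''
--     c_mult = 0
--     for day in timetable:
--         for interval in timetable[day]:
--             profs_teaching = set()
--             for classroom in timetable[day][interval]:
--                 if timetable[day][interval][classroom] is not None:
--                     prof, _ = timetable[day][interval][classroom]
--                     if prof in profs_teaching:
--                         c_mult += 100
--                     profs_teaching.add(prof)
--     return c_mult
-- ===== SOURCE B (Python) =====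
-- def __compute_c_mult(timetable: dict) -> int:
--     '''
--         Computes the fitness for the c_mult constraint (professor in multiple places at the same time)
--     '''
--     c_mult = 0
--     for day in timetable:
--         for interval in timetable[day]:
--             profs = []
--             for classroom in timetable[day][interval]:
--                 cell = timetable[day][interval][classroom]
--                 if cell is not None:
--                     prof, _ = cell
--                     profs.append(prof)
--             profs.sort()
--             for x, y in zip(profs, profs[1:]):
--                 if x == y:
--                     c_mult += 100
--     return c_mult
-- ===== Notes on version B (the rewrite author's own statement) =====
-- stated objective: alternative
-- what changed: Replaces A's per-cell incremental seen-set membership test by a sort-then-scan: collect the interval's professors, sort them, and add 100 for each adjacent equal pair in the sorted list (duplicates are adjacent after sorting, so the adjacent-pair count equals A's repeat count).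
import Mathlib
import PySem

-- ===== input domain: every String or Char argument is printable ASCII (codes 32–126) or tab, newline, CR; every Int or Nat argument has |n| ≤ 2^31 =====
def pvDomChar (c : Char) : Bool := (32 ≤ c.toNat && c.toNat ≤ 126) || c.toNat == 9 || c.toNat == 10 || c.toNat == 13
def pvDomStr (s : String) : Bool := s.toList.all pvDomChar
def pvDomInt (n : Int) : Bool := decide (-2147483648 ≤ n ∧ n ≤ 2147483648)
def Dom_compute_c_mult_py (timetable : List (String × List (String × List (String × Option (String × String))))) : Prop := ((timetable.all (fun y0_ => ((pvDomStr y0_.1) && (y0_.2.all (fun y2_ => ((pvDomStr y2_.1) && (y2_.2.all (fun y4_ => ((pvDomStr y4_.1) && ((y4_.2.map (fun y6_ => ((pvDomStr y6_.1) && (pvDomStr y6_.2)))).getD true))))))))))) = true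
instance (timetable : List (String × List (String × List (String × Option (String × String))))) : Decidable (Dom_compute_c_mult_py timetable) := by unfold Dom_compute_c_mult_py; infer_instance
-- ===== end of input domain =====

-- B replaces A's incremental seen-set membership test by sort-then-scan: collect the interval's
-- professors, sort them, and add 100 per adjacent equal pair (objective: alternative, not faster).

-- ===== PORT A =====
def compute_c_mult_py (timetable : List (String × List (String × List (String × Option (String × String))))) : Int :=
  timetable.foldl (fun c_mult day =>
    day.2.foldl (fun c_mult interval =>
      (interval.2.foldl (fun (st : Int × PySem.Set String) classroom =>
          match classroom.2 with
          | none => st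
          | some (prof, _) =>
              ((if PySem.Set.contains st.2 prof then st.1 + 100 else st.1), PySem.Set.add st.2 prof))
        (c_mult, PySem.Set.empty)).1) c_mult) 0

-- ===== PORT B =====
def compute_c_mult_py_alt (timetable : List (String × List (String × List (String × Option (String × String))))) : Int :=
  timetable.foldl (fun c_mult day =>
    day.2.foldl (fun c_mult interval =>
      let profs := interval.2.foldl (fun acc classroom =>
          match classroom.2 with
          | none => acc
          | some (prof, _) => acc ++ [prof]) []
      let profs := PySem.List.sorted profs (fun x => x) false
      (profs.zip (PySem.List.slice profs (some 1) none)).foldl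
        (fun c p => if p.1 = p.2 then c + 100 else c) c_mult) c_mult) 0

-- ===== PRECONDITION & SPEC =====
def Spec_compute_c_mult_py (timetable : List (String × List (String × List (String × Option (String × String))))) (out : Int) : Prop := out = compute_c_mult_py_alt timetable
instance (timetable : List (String × List (String × List (String × Option (String × String))))) (out : Int) : Decidable (Spec_compute_c_mult_py timetable out) := by unfold Spec_compute_c_mult_py; infer_instance

-- ===== CLAIM (what is proved, stated in full; the proofs are below) =====
def Claim_equal_compute_c_mult_py : Prop := ∀ (timetable : List (String × List (String × List (String × Option (String × String))))), Dom_compute_c_mult_py timetable → Spec_compute_c_mult_py timetable (compute_c_mult_py timetable)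

-- ===== LEMMAS AND PROOFS =====

-- number of adjacent equal pairs in a list (what B's zip scan counts)
def adjCount : List String → Nat
  | a :: b :: t => (if a = b then 1 else 0) + adjCount (b :: t)
  | _ => 0

-- the professors of the non-None cells of one interval, in order (B's and A's inner extraction)
theorem profs_foldl_eq (cells : List (String × Option (String × String))) :
    ∀ acc : List String,
      cells.foldl (fun acc classroom =>
          match classroom.2 with
          | none => acc
          | some (prof, _) => acc ++ [prof]) acc
        = acc ++ cells.filterMap (fun classroom => classroom.2.map Prod.fst) := by
  induction cells with
  | nil => simp [List.foldl]
  | cons cell rest ih =>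
      intro acc
      obtain ⟨room, cellv⟩ := cell
      cases cellv with
      | none => simp [List.foldl, ih]
      | some pg => obtain ⟨p, g⟩ := pg; simp [List.foldl, ih]

-- A's inner fold over cells, rewritten as a fold over the extracted professor list
theorem innerA_as_profs (cells : List (String × Option (String × String))) :
    ∀ (st : Int × PySem.Set String),
      cells.foldl (fun (st : Int × PySem.Set String) classroom =>
          match classroom.2 with
          | none => st
          | some (prof, _) =>
              ((if PySem.Set.contains st.2 prof then st.1 + 100 else st.1), PySem.Set.add st.2 prof)) st
        = (cells.filterMap (fun classroom => classroom.2.map Prod.fst)).foldl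
            (fun (st : Int × PySem.Set String) prof =>
              ((if PySem.Set.contains st.2 prof then st.1 + 100 else st.1), PySem.Set.add st.2 prof)) st := by
  induction cells with
  | nil => intro st; simp
  | cons cell rest ih =>
      intro st
      obtain ⟨room, cellv⟩ := cell
      cases cellv with
      | none => simpa [List.filterMap_cons] using ih st
      | some pg =>
          obtain ⟨p, g⟩ := pg
          simpa [List.filterMap_cons] using ih _

-- A's duplicate-counting fold = 100 * (length − number of newly seen distinct elements)
theorem dup_fold (ps : List String) :
    ∀ (c : Int) (s : PySem.Set String),
      ((ps.foldl (fun (st : Int × PySem.Set String) prof =>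
          ((if PySem.Set.contains st.2 prof then st.1 + 100 else st.1), PySem.Set.add st.2 prof)) (c, s)).1)
        = c + 100 * ((ps.length : Int) + (s.length : Int) - ((ps.foldl PySem.Set.add s).length : Int)) := by
  induction ps with
  | nil => intro c s; simp
  | cons p rest ih =>
      intro c s
      simp only [List.foldl_cons]
      by_cases hp : p ∈ s
      · have hc : PySem.Set.contains s p = true := by simp [PySem.Set.contains, hp]
        have hadd : PySem.Set.add s p = s := by simp [PySem.Set.add, hp]
        rw [if_pos hc, hadd, ih]
        push_cast [List.length_cons]
        ring
      · have hc : ¬ PySem.Set.contains s p = true := by simp [PySem.Set.contains, hp]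
        have hadd : PySem.Set.add s p = s ++ [p] := by simp [PySem.Set.add, hp]
        rw [if_neg hc, hadd, ih]
        push_cast [List.length_cons, List.length_append, List.length_nil]
        ring

-- B's zip scan counts the adjacent equal pairs
theorem zip_fold_adjCount (l : List String) :
    ∀ c : Int,
      (l.zip l.tail).foldl (fun c p => if p.1 = p.2 then c + 100 else c) c
        = c + 100 * (adjCount l : Int) := by
  induction l with
  | nil => intro c; simp [adjCount]
  | cons a t ih =>
      intro c
      cases t with
      | nil => simp [adjCount]
      | cons b t2 =>
          simp only [List.tail_cons] at ih
          simp only [List.tail_cons, List.zip_cons_cons, List.foldl_cons]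
          by_cases hab : a = b
          · rw [if_pos hab, ih]
            simp [adjCount, hab]; ring
          · rw [if_neg hab, ih]
            simp [adjCount, hab]

-- on a sorted list, adjacent equal pairs + distinct elements = length
theorem sorted_adjCount (l : List String) (h : l.Pairwise (· ≤ ·)) :
    adjCount l + l.dedup.length = l.length := by
  induction l with
  | nil => simp [adjCount]
  | cons a t ih =>
      cases t with
      | nil => simp [adjCount]
      | cons b t2 =>
          have hab : a ≤ b := (List.pairwise_cons.mp h).1 b (by simp)
          have htail : (b :: t2).Pairwise (· ≤ ·) := (List.pairwise_cons.mp h).2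
          have ih' := ih htail
          simp only [List.length_cons] at ih'
          by_cases he : a = b
          · subst he
            rw [List.dedup_cons_of_mem (by simp),
              show adjCount (a :: a :: t2) = 1 + adjCount (a :: t2) from by simp [adjCount]]
            simp only [List.length_cons]
            omega
          · have hnm : a ∉ b :: t2 := by
              intro hmem
              rcases List.mem_cons.mp hmem with h1 | h2
              · exact he h1
              · exact he (le_antisymm hab ((List.pairwise_cons.mp htail).1 a h2))
            rw [List.dedup_cons_of_notMem hnm]
            simp only [adjCount, if_neg he, List.length_cons]
            omega

-- Set.ofList has as many elements as dedup (both enumerate the distinct elements)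
theorem ofList_length_eq_dedup (ps : List String) :
    (PySem.Set.ofList ps).length = ps.dedup.length := by
  have hperm : (PySem.Set.ofList ps).Perm ps.dedup := by
    rw [List.perm_ext_iff_of_nodup (PySem.Set.nodup_ofList ps) (List.nodup_dedup ps)]
    intro x
    simp [PySem.Set.mem_ofList]
  exact hperm.length_eq

-- per-interval equality of the two inner computations
theorem interval_eq (cells : List (String × Option (String × String))) (c : Int) :
    (cells.foldl (fun (st : Int × PySem.Set String) classroom =>
        match classroom.2 with
        | none => st
        | some (prof, _) =>
            ((if PySem.Set.contains st.2 prof then st.1 + 100 else st.1), PySem.Set.add st.2 prof))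
      (c, PySem.Set.empty)).1
      = (let profs := cells.foldl (fun acc classroom =>
            match classroom.2 with
            | none => acc
            | some (prof, _) => acc ++ [prof]) []
         let profs := PySem.List.sorted profs (fun x => x) false
         (profs.zip (PySem.List.slice profs (some 1) none)).foldl
           (fun c p => if p.1 = p.2 then c + 100 else c) c) := by
  simp only [profs_foldl_eq, List.nil_append]
  set ps := cells.filterMap (fun classroom => classroom.2.map Prod.fst) with hps
  rw [innerA_as_profs, dup_fold]
  set q := PySem.List.sorted ps (fun x => x) false with hq
  rw [PySem.List.slice_from_one, zip_fold_adjCount]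
  have hperm : q.Perm ps := PySem.List.sorted_perm ps (fun x => x) false
  have hsorted : q.Pairwise (· ≤ ·) := by
    have := PySem.List.sorted_pairwise ps (fun x => x)
    simpa using this
  have hadj := sorted_adjCount q hsorted
  have hded : q.dedup.length = ps.dedup.length := (hperm.dedup).length_eq
  have hlen : q.length = ps.length := hperm.length_eq
  have hof : ((ps.foldl PySem.Set.add PySem.Set.empty).length) = ps.dedup.length := by
    rw [show (PySem.Set.empty : PySem.Set String) = ([] : List String) from rfl,
      ← PySem.Set.ofList_eq_foldl]
    exact ofList_length_eq_dedup ps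
  have hempty : (PySem.Set.empty : PySem.Set String).length = 0 := by simp [PySem.Set.empty]
  rw [hof, hempty]
  have : (adjCount q : Int) = (ps.length : Int) - (ps.dedup.length : Int) := by
    have h1 : (ps.dedup.length : Int) ≤ (ps.length : Int) := by
      exact_mod_cast (List.Sublist.length_le (List.dedup_sublist ps))
    omega
  rw [this]; ring

-- ===== VERDICT (by name: the statement is the Claim_ definition above) =====
theorem compute_c_mult_py_spec : Claim_equal_compute_c_mult_py := by
  intro timetable _
  unfold Spec_compute_c_mult_py compute_c_mult_py compute_c_mult_py_alt
  congr 1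
  funext c day
  congr 1
  funext c' interval
  exact interval_eq interval.2 c'
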